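-- pv_equiv track=rewrite | github.com/Kossencrap/pharma-insights-tool | src/analytics/narratives.py | _nearest_before
-- ===== SOURCE A (Python) =====
-- from typing import Iterable, Optional, Sequence, Set, Tuple
--
-- def _nearest_before(spans: dict[str, list[tuple[int, int]]], index: int) -> Optional[str]:
--     best_id: Optional[str] = None
--     best_pos: Optional[int] = None
--     for product_id, product_spans in spans.items():
--         for _, end in product_spans:
--             if end <= index and (best_pos is None or end > best_pos):
--                 best_pos = end
--                 best_id = product_id
--     return best_id
-- ===== SOURCE B (Python) =====
-- from typing import Optional
--
-- def _nearest_before(spans: dict[str, list[tuple[int, int]]], index: int) -> Optional[str]: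
--     ends = [end for product_spans in spans.values() for _, end in product_spans if end <= index]
--     if not ends:
--         return None
--     best = max(ends)
--     for product_id, product_spans in spans.items():
--         if any(end == best for _, end in product_spans):
--             return product_id
--     return None
-- ===== Notes on version B (the rewrite author's own statement) =====
-- stated objective: alternative
-- what changed: Replaced the single incremental argmax loop (tracking best_id and best_pos together) by an aggregate-then-locate pair: first compute the maximum span end <= index over all products, then return the first product containing that end.
import Mathlib
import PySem

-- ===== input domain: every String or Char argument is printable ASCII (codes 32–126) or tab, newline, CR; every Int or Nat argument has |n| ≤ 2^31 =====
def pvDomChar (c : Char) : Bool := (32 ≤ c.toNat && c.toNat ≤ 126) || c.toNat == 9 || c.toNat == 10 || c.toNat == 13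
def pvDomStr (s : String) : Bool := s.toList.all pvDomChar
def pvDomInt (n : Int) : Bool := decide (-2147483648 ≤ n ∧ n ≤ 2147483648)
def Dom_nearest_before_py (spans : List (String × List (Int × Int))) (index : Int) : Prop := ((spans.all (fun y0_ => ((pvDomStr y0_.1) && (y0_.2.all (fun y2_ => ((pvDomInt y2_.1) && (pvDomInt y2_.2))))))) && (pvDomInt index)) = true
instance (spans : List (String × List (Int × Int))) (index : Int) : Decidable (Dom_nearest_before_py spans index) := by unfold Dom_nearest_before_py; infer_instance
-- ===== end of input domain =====

-- B replaces A's single incremental argmax loop by an aggregate-then-locate pair of passes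
-- (compute the maximal end ≤ index, then find the first product containing it); alternative, same cost.

-- ===== PORT A =====
-- 'best_pos is None or end > best_pos' of A's condition
def pvBeats (pos : Option Int) (e : Int) : Bool :=
  match pos with
  | none => true
  | some p => decide (p < e)

-- inner 'for _, end in product_spans' loop of A, state = (best_id, best_pos)
def pvInnerA (index : Int) (pid : String) (st : Option String × Option Int)
    (ps : List (Int × Int)) : Option String × Option Int :=
  ps.foldl (fun st s =>
    if decide (s.2 ≤ index) && pvBeats st.2 s.2 then (some pid, some s.2) else st) st

-- outer 'for product_id, product_spans in spans.items()' loop of A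
def pvOuterA (index : Int) (st : Option String × Option Int)
    (l : List (String × List (Int × Int))) : Option String × Option Int :=
  l.foldl (fun st p => pvInnerA index p.1 st p.2) st

def nearest_before_py (spans : List (String × List (Int × Int))) (index : Int) : Option String :=
  (pvOuterA index (none, none) spans).1

-- ===== PORT B =====
def nearest_before_py_alt (spans : List (String × List (Int × Int))) (index : Int) : Option String :=
  let ends := spans.flatMap (fun p => (p.2.filter (fun s => decide (s.2 ≤ index))).map Prod.snd)
  if ends.isEmpty then none
  else
    match PySem.List.max? ends (fun e => e) with
    | none => none
    | some best => (spans.find? (fun p => p.2.any (fun s => s.2 == best))).map Prod.fst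

-- ===== PRECONDITION & SPEC =====
def Spec_nearest_before_py (spans : List (String × List (Int × Int))) (index : Int) (out : Option String) : Prop := out = nearest_before_py_alt spans index
instance (spans : List (String × List (Int × Int))) (index : Int) (out : Option String) : Decidable (Spec_nearest_before_py spans index out) := by unfold Spec_nearest_before_py; infer_instance

-- ===== CLAIM (what is proved, stated in full; the proofs are below) =====
def Claim_equal_nearest_before_py : Prop := ∀ (spans : List (String × List (Int × Int))) (index : Int), Dom_nearest_before_py spans index → Spec_nearest_before_py spans index (nearest_before_py spans index)

-- ===== LEMMAS AND PROOFS =====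

-- running maximum of the ends ≤ index in one span list, started from pos
def pvMaxUpd (index : Int) (pos : Option Int) (ps : List (Int × Int)) : Option Int :=
  ps.foldl (fun a s => if decide (s.2 ≤ index) && pvBeats a s.2 then some s.2 else a) pos

-- running maximum over the whole spans list
def pvMaxA (index : Int) (pos : Option Int) (l : List (String × List (Int × Int))) : Option Int :=
  l.foldl (fun a p => pvMaxUpd index a p.2) pos

theorem pvInnerA_cons (index : Int) (pid : String) (st : Option String × Option Int)
    (a : Int × Int) (ps : List (Int × Int)) :
    pvInnerA index pid st (a :: ps) =
      pvInnerA index pid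
        (if decide (a.2 ≤ index) && pvBeats st.2 a.2 then (some pid, some a.2) else st) ps := rfl

theorem pvMaxUpd_cons (index : Int) (pos : Option Int) (a : Int × Int) (ps : List (Int × Int)) :
    pvMaxUpd index pos (a :: ps) =
      pvMaxUpd index (if decide (a.2 ≤ index) && pvBeats pos a.2 then some a.2 else pos) ps := rfl

theorem pvMaxA_cons (index : Int) (pos : Option Int) (p : String × List (Int × Int))
    (l : List (String × List (Int × Int))) :
    pvMaxA index pos (p :: l) = pvMaxA index (pvMaxUpd index pos p.2) l := rfl

theorem pvOuterA_cons (index : Int) (st : Option String × Option Int)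
    (p : String × List (Int × Int)) (l : List (String × List (Int × Int))) :
    pvOuterA index st (p :: l) = pvOuterA index (pvInnerA index p.1 st p.2) l := rfl

theorem pvInnerA_char (index : Int) (pid : String) (ps : List (Int × Int)) :
    ∀ st : Option String × Option Int,
    pvInnerA index pid st ps =
      ((if ps.any (fun s => decide (s.2 ≤ index) && pvBeats st.2 s.2) then some pid else st.1),
        pvMaxUpd index st.2 ps) := by
  induction ps with
  | nil => intro st; simp [pvInnerA, pvMaxUpd]
  | cons a ps ih =>
    intro st
    rw [pvInnerA_cons]
    by_cases hc : (decide (a.2 ≤ index) && pvBeats st.2 a.2) = true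
    · rw [if_pos hc, ih, pvMaxUpd_cons, if_pos hc]
      simp [List.any_cons, hc]
    · rw [Bool.not_eq_true] at hc
      rw [if_neg (by rw [hc]; exact Bool.false_ne_true), ih, pvMaxUpd_cons, hc,
        List.any_cons, hc, Bool.false_or, if_neg (Bool.false_ne_true)]

theorem pvMaxUpd_mono (index : Int) (ps : List (Int × Int)) :
    ∀ pos e, pvBeats pos e = false → pvBeats (pvMaxUpd index pos ps) e = false := by
  induction ps with
  | nil => intro pos e h; simpa [pvMaxUpd] using h
  | cons a ps ih =>
    intro pos e h
    rw [pvMaxUpd_cons]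
    by_cases hc : (decide (a.2 ≤ index) && pvBeats pos a.2) = true
    · rw [if_pos hc]
      apply ih
      cases pos with
      | none => simp [pvBeats] at h
      | some u =>
        simp only [Bool.and_eq_true, decide_eq_true_eq] at hc
        simp [pvBeats] at h hc ⊢
        omega
    · rw [if_neg hc]; exact ih pos e h

theorem pvMaxUpd_ub (index : Int) (ps : List (Int × Int)) :
    ∀ pos s, s ∈ ps → s.2 ≤ index → pvBeats (pvMaxUpd index pos ps) s.2 = false := by
  induction ps with
  | nil => intro pos s hs; simp at hs
  | cons a ps ih =>
    intro pos s hs hle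
    rw [pvMaxUpd_cons]
    rcases List.mem_cons.mp hs with h | h
    · subst h
      by_cases hc : (decide (s.2 ≤ index) && pvBeats pos s.2) = true
      · rw [if_pos hc]
        exact pvMaxUpd_mono index ps _ _ (by simp [pvBeats])
      · rw [if_neg hc]
        apply pvMaxUpd_mono
        simp [hle] at hc
        exact hc
    · split <;> exact ih _ s h hle

theorem pvMaxUpd_shape (index : Int) (ps : List (Int × Int)) :
    ∀ pos, pvMaxUpd index pos ps = pos ∨
      ∃ s ∈ ps, s.2 ≤ index ∧ pvBeats pos s.2 = true ∧ pvMaxUpd index pos ps = some s.2 := by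
  induction ps with
  | nil => intro pos; left; simp [pvMaxUpd]
  | cons a ps ih =>
    intro pos
    rw [pvMaxUpd_cons]
    by_cases hc : (decide (a.2 ≤ index) && pvBeats pos a.2) = true
    · rw [if_pos hc]
      simp only [Bool.and_eq_true, decide_eq_true_eq] at hc
      rcases ih (some a.2) with h | ⟨s, hs, h1, h2, h3⟩
      · right; exact ⟨a, by simp, hc.1, hc.2, h⟩
      · right
        refine ⟨s, by simp [hs], h1, ?_, h3⟩
        cases pos with
        | none => rfl
        | some u => simp [pvBeats] at hc h2 ⊢; omega
    · rw [if_neg hc]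
      rcases ih pos with h | ⟨s, hs, h1, h2, h3⟩
      · left; exact h
      · right; exact ⟨s, by simp [hs], h1, h2, h3⟩

theorem pvMaxA_mono (index : Int) (l : List (String × List (Int × Int))) :
    ∀ pos e, pvBeats pos e = false → pvBeats (pvMaxA index pos l) e = false := by
  induction l with
  | nil => intro pos e h; simpa [pvMaxA] using h
  | cons p l ih =>
    intro pos e h
    rw [pvMaxA_cons]
    exact ih _ e (pvMaxUpd_mono index p.2 pos e h)

theorem pvMaxA_ub (index : Int) (l : List (String × List (Int × Int))) :
    ∀ pos p s, p ∈ l → s ∈ p.2 → s.2 ≤ index → pvBeats (pvMaxA index pos l) s.2 = false := by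
  induction l with
  | nil => intro pos p s hp; simp at hp
  | cons q l ih =>
    intro pos p s hp hs hle
    rw [pvMaxA_cons]
    rcases List.mem_cons.mp hp with h | h
    · subst h
      exact pvMaxA_mono index l _ _ (pvMaxUpd_ub index p.2 pos s hs hle)
    · exact ih _ p s h hs hle

theorem pvMaxA_shape (index : Int) (l : List (String × List (Int × Int))) :
    ∀ pos, pvMaxA index pos l = pos ∨
      ∃ p ∈ l, ∃ s ∈ p.2, s.2 ≤ index ∧ pvBeats pos s.2 = true ∧ pvMaxA index pos l = some s.2 := by
  induction l with
  | nil => intro pos; left; simp [pvMaxA]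
  | cons q l ih =>
    intro pos
    rw [pvMaxA_cons]
    rcases pvMaxUpd_shape index q.2 pos with h | ⟨s, hs, h1, h2, h3⟩
    · rw [h]
      rcases ih pos with h' | ⟨p, hp, s, hs, hh⟩
      · left; exact h'
      · right; exact ⟨p, by simp [hp], s, hs, hh⟩
    · rw [h3]
      rcases ih (some s.2) with h' | ⟨p, hp, s', hs', g1, g2, g3⟩
      · right; exact ⟨q, by simp, s, hs, h1, h2, h'⟩
      · right
        refine ⟨p, by simp [hp], s', hs', g1, ?_, g3⟩
        cases pos with
        | none => rfl
        | some u => simp [pvBeats] at h2 g2 ⊢; omega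

theorem pvMaxUpd_achieve (index : Int) (ps : List (Int × Int)) (pos : Option Int) (m : Int)
    (hb : pvBeats pos m = true) (hle : m ≤ index)
    (hmem : ∃ s ∈ ps, s.2 = m) (hub : ∀ s ∈ ps, s.2 ≤ index → s.2 ≤ m) :
    pvMaxUpd index pos ps = some m := by
  obtain ⟨s, hs, hsm⟩ := hmem
  have h1 := pvMaxUpd_ub index ps pos s hs (by rw [hsm]; exact hle)
  rcases pvMaxUpd_shape index ps pos with h | ⟨s', hs', g1, g2, g3⟩
  · rw [h] at h1
    cases pos with
    | none => simp [pvBeats] at h1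
    | some u => simp [pvBeats, hsm] at h1 hb; omega
  · rw [g3] at h1 ⊢
    have := hub s' hs' g1
    simp [pvBeats, hsm] at h1
    have : s'.2 = m := by omega
    rw [this]

theorem pvOuterA_same (index : Int) (l : List (String × List (Int × Int))) :
    ∀ pos id, pvMaxA index pos l = pos → pvOuterA index (id, pos) l = (id, pos) := by
  induction l with
  | nil => intro pos id _; simp [pvOuterA]
  | cons p l ih =>
    intro pos id h
    rw [pvMaxA_cons] at h
    have hupd : pvMaxUpd index pos p.2 = pos := by
      rcases pvMaxUpd_shape index p.2 pos with h' | ⟨s, hs, g1, g2, g3⟩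
      · exact h'
      · exfalso
        rw [g3] at h
        rcases pvMaxA_shape index l (some s.2) with h' | ⟨q, hq, s', hs', k1, k2, k3⟩
        · rw [h'] at h
          cases pos with
          | none => simp at h
          | some u => simp [pvBeats] at g2; injection h with h; omega
        · rw [k3] at h
          cases pos with
          | none => simp at h
          | some u => simp [pvBeats] at g2 k2; injection h with h; omega
    have hany : (p.2.any (fun s => decide (s.2 ≤ index) && pvBeats pos s.2)) = false := by
      by_contra hc
      rw [Bool.not_eq_false, List.any_eq_true] at hc
      obtain ⟨s, hs, hcond⟩ := hc
      simp only [Bool.and_eq_true, decide_eq_true_eq] at hcond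
      have hub := pvMaxUpd_ub index p.2 pos s hs hcond.1
      rw [hupd, hcond.2] at hub
      exact absurd hub (by simp)
    rw [pvOuterA_cons, pvInnerA_char]
    simp only [hany, Bool.false_eq_true, if_false, hupd]
    apply ih
    rw [hupd] at h
    exact h

theorem pvOuterA_find (index : Int) (l : List (String × List (Int × Int))) :
    ∀ pos id m, pvMaxA index pos l = some m → pvBeats pos m = true → m ≤ index →
    (∀ p ∈ l, ∀ s ∈ p.2, s.2 ≤ index → s.2 ≤ m) →
    (∃ p ∈ l, ∃ s ∈ p.2, s.2 = m) →
    ∃ q, l.find? (fun p => p.2.any (fun s => s.2 == m)) = some q ∧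
      pvOuterA index (id, pos) l = (some q.1, some m) := by
  induction l with
  | nil => intro pos id m _ _ _ _ hmem; simp at hmem
  | cons p l ih =>
    intro pos id m hmax hb hle hub hmem
    rw [pvMaxA_cons] at hmax
    by_cases hP : (p.2.any (fun s => s.2 == m)) = true
    · obtain ⟨s, hs, hsm⟩ := List.any_eq_true.mp hP
      rw [beq_iff_eq] at hsm
      have hupd : pvMaxUpd index pos p.2 = some m :=
        pvMaxUpd_achieve index p.2 pos m hb hle ⟨s, hs, hsm⟩
          (fun s' hs' h' => hub p (by simp) s' hs' h')
      have hany : (p.2.any (fun s => decide (s.2 ≤ index) && pvBeats pos s.2)) = true :=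
        List.any_eq_true.mpr ⟨s, hs, by rw [hsm]; simp [hle, hb]⟩
      refine ⟨p, List.find?_cons_of_pos hP, ?_⟩
      rw [pvOuterA_cons, pvInnerA_char]
      simp only [hany, if_true, hupd]
      rw [hupd] at hmax
      exact pvOuterA_same index l (some m) (some p.1) hmax
    · have hnom : ∀ s ∈ p.2, s.2 ≠ m := by
        intro s hs hc
        exact hP (List.any_eq_true.mpr ⟨s, hs, beq_iff_eq.mpr hc⟩)
      have hb' : pvBeats (pvMaxUpd index pos p.2) m = true := by
        rcases pvMaxUpd_shape index p.2 pos with h | ⟨s, hs, g1, g2, g3⟩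
        · rw [h]; exact hb
        · rw [g3]
          have h1 := hub p (by simp) s hs g1
          have h2 := hnom s hs
          simp [pvBeats]; omega
      obtain ⟨q, hq1, hq2⟩ := ih (pvMaxUpd index pos p.2)
        (if p.2.any (fun s => decide (s.2 ≤ index) && pvBeats pos s.2) then some p.1 else id)
        m hmax hb' hle
        (fun r hr s hs h => hub r (by simp [hr]) s hs h)
        (by
          obtain ⟨r, hr, s, hs, hsm⟩ := hmem
          rcases List.mem_cons.mp hr with h | h
          · subst h; exact absurd hsm (hnom s hs)
          · exact ⟨r, h, s, hs, hsm⟩)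
      refine ⟨q, ?_, ?_⟩
      · rw [List.find?_cons_of_neg (by simp [hP])]
        exact hq1
      · rw [pvOuterA_cons, pvInnerA_char]
        exact hq2

theorem mem_ends_iff (spans : List (String × List (Int × Int))) (index : Int) (e : Int) :
    e ∈ spans.flatMap (fun p => (p.2.filter (fun s => decide (s.2 ≤ index))).map Prod.snd) ↔
      ∃ p ∈ spans, ∃ s ∈ p.2, s.2 ≤ index ∧ s.2 = e := by
  simp only [List.mem_flatMap, List.mem_map, List.mem_filter, decide_eq_true_eq]
  constructor
  · rintro ⟨p, hp, s, ⟨hs, hle⟩, he⟩; exact ⟨p, hp, s, hs, hle, he⟩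
  · rintro ⟨p, hp, s, hs, hle, he⟩; exact ⟨p, hp, s, ⟨hs, hle⟩, he⟩

-- ===== VERDICT (by name: the statement is the Claim_ definition above) =====
theorem nearest_before_py_spec : Claim_equal_nearest_before_py := by
  unfold Claim_equal_nearest_before_py
  intro spans index _
  unfold Spec_nearest_before_py nearest_before_py nearest_before_py_alt
  set ends := spans.flatMap (fun p => (p.2.filter (fun s => decide (s.2 ≤ index))).map Prod.snd)
    with hends
  by_cases h : ends = []
  · rw [h]
    simp only [List.isEmpty_nil, if_pos]
    have hnone : pvMaxA index none spans = none := by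
      rcases pvMaxA_shape index spans none with h' | ⟨p, hp, s, hs, g1, _, _⟩
      · exact h'
      · exfalso
        have : s.2 ∈ ends := (mem_ends_iff spans index s.2).mpr ⟨p, hp, s, hs, g1, rfl⟩
        rw [h] at this; simp at this
    rw [show pvOuterA index (none, none) spans = ((none : Option String), (none : Option Int))
      from pvOuterA_same index spans none none hnone]
  · rw [if_neg (by simp [h])]
    obtain ⟨m, hm⟩ : ∃ m, PySem.List.max? ends (fun e => e) = some m := by
      cases hmx : PySem.List.max? ends (fun e => e) with
      | none => exact absurd ((PySem.List.max?_eq_none_iff ends (fun e => e)).mp hmx) h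
      | some m => exact ⟨m, rfl⟩
    rw [hm]
    have hmem := PySem.List.max?_mem hm
    have hub' := PySem.List.max?_isMax hm
    obtain ⟨p0, hp0, s0, hs0, hle0, he0⟩ := (mem_ends_iff spans index m).mp hmem
    have hub : ∀ p ∈ spans, ∀ s ∈ p.2, s.2 ≤ index → s.2 ≤ m := by
      intro p hp s hs hle
      exact hub' s.2 ((mem_ends_iff spans index s.2).mpr ⟨p, hp, s, hs, hle, rfl⟩)
    have hmaxA : pvMaxA index none spans = some m := by
      have h1 := pvMaxA_ub index spans none p0 s0 hp0 hs0 hle0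
      rcases pvMaxA_shape index spans none with h' | ⟨p, hp, s, hs, g1, _, g3⟩
      · rw [h'] at h1; simp [pvBeats] at h1
      · rw [g3] at h1 ⊢
        have := hub p hp s hs g1
        rw [he0] at h1
        simp [pvBeats] at h1
        have : s.2 = m := by omega
        rw [this]
    obtain ⟨q, hq1, hq2⟩ := pvOuterA_find index spans none none m hmaxA rfl (he0 ▸ hle0) hub
      ⟨p0, hp0, s0, hs0, he0⟩
    rw [hq2]
    simp [hq1]
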